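-- pv_equiv track=rewrite | github.com/lingzhao11/TADClam | TADClam.py | boundary_sorted
-- ===== SOURCE A (Python) =====
-- def boundary_sorted(N, mid_boundaries):
--     # for each bin, sorted the tad according to the len of tad, big to small
--     sorted_boundaries = []
--     for i in range(N):
--         parent_i = []
--         len_parent_i = []
--         for temp in mid_boundaries:
--             if temp[0] <= i and  i <= temp[1]:
--                 parent_i.append(temp)
--                 len_parent_i.append(temp[1]-temp[0])
--         sorted_indices = sorted(range(len(len_parent_i)), key=lambda x: len_parent_i[x], reverse=True)
--         for index in sorted_indices:
--             if not parent_i[index] in sorted_boundaries: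
--                 sorted_boundaries.append(parent_i[index])
--     return sorted_boundaries
-- ===== SOURCE B (Python) =====
-- def boundary_sorted(N, mid_boundaries):
--     # One global sort instead of a per-bin rescan: keep the intervals that
--     # cover some bin in [0, N-1]; two stable sorts order them by length
--     # descending, then by first covered bin; dedup keeps first occurrences.
--     kept = [t for t in mid_boundaries if max(0, t[0]) <= min(N - 1, t[1])]
--     kept.sort(key=lambda t: t[0] - t[1])      # length descending (stable)
--     kept.sort(key=lambda t: max(0, t[0]))     # group by first covered bin (stable)
--     seen = set()
--     out = []
--     for t in kept:
--         k = (t[0], t[1])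
--         if k not in seen:
--             seen.add(k)
--             out.append(t)
--     return out
-- ===== Notes on version B (the rewrite author's own statement) =====
-- stated objective: faster
-- what changed: Instead of scanning all intervals once per bin and inserting with a linear 'in list' test, B filters the intervals once, orders them globally with two stable sorts (length descending, then first covered bin) and deduplicates in one pass with a seen set.
import Mathlib
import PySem

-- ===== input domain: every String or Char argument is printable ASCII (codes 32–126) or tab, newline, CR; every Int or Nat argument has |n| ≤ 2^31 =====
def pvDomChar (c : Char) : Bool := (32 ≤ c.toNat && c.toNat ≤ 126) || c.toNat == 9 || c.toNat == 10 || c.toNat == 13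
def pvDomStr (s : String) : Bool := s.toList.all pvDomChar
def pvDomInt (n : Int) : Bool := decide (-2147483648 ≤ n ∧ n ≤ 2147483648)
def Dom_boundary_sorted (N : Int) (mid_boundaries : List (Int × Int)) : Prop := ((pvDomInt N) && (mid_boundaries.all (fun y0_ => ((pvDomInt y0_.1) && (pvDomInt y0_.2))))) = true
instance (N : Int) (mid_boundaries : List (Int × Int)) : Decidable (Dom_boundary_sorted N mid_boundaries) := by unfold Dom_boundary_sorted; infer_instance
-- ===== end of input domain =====

-- B replaces A's per-bin rescan-and-insert by one filter, two stable sorts and a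
-- seen-set dedup pass (objective: faster).

-- ===== PORT A =====
def boundary_sorted (N : Int) (mid_boundaries : List (Int × Int)) : List (Int × Int) :=
  (PySem.List.pyRange 0 N).foldl (fun sorted_boundaries i =>
    let pl := mid_boundaries.foldl
      (fun (st : List (Int × Int) × List Int) temp =>
        if temp.1 ≤ i ∧ i ≤ temp.2 then (st.1 ++ [temp], st.2 ++ [temp.2 - temp.1]) else st)
      ([], [])
    let parent_i := pl.1
    let len_parent_i := pl.2
    let sorted_indices := PySem.List.sorted (PySem.List.pyRange 0 (PySem.List.len len_parent_i))
      (fun x => PySem.List.pyGetD len_parent_i x 0) true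
    sorted_indices.foldl (fun acc index =>
      if PySem.List.pyGetD parent_i index (0, 0) ∈ acc then acc
      else acc ++ [PySem.List.pyGetD parent_i index (0, 0)]) sorted_boundaries) []

-- ===== PORT B =====
def boundary_sorted_alt (N : Int) (mid_boundaries : List (Int × Int)) : List (Int × Int) :=
  let kept := mid_boundaries.filter (fun t => decide (max 0 t.1 ≤ min (N - 1) t.2))
  let s1 := PySem.List.sorted kept (fun t => t.1 - t.2) false
  let s2 := PySem.List.sorted s1 (fun t => max 0 t.1) false
  (s2.foldl (fun (st : List (Int × Int) × PySem.Set (Int × Int)) t =>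
      if (t.1, t.2) ∈ st.2 then st
      else (st.1 ++ [t], PySem.Set.add st.2 (t.1, t.2)))
    ([], PySem.Set.empty)).1

-- ===== PRECONDITION & SPEC =====
def Spec_boundary_sorted (N : Int) (mid_boundaries : List (Int × Int)) (out : List (Int × Int)) : Prop := out = boundary_sorted_alt N mid_boundaries
instance (N : Int) (mid_boundaries : List (Int × Int)) (out : List (Int × Int)) : Decidable (Spec_boundary_sorted N mid_boundaries out) := by unfold Spec_boundary_sorted; infer_instance

-- ===== CLAIM (what is proved, stated in full; the proofs are below) =====
def Claim_equal_boundary_sorted : Prop := ∀ (N : Int) (mid_boundaries : List (Int × Int)), Dom_boundary_sorted N mid_boundaries → Spec_boundary_sorted N mid_boundaries (boundary_sorted N mid_boundaries)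

-- ===== LEMMAS AND PROOFS =====

-- abbreviations used only in the proofs
def pvLenK (t : Int × Int) : Int := t.2 - t.1          -- A's sort key (length, sorted descending)
def pvNegK (t : Int × Int) : Int := t.1 - t.2          -- B's first sort key (ascending)
def pvFb (t : Int × Int) : Int := max 0 t.1            -- first covered bin
def pvCov (i : Int) (t : Int × Int) : Bool := decide (t.1 ≤ i ∧ i ≤ t.2)
def pvKept (N : Int) (t : Int × Int) : Bool := decide (max 0 t.1 ≤ min (N - 1) t.2)
def pvPush (acc : List (Int × Int)) (t : Int × Int) : List (Int × Int) :=
  if t ∈ acc then acc else acc ++ [t]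
def pvDApp (acc l : List (Int × Int)) : List (Int × Int) := l.foldl pvPush acc
def pvBef (k : (Int × Int) → Int) (a b : Int × Int) : Bool := decide (k a < k b)

theorem pvDApp_append (acc l1 l2 : List (Int × Int)) :
    pvDApp acc (l1 ++ l2) = pvDApp (pvDApp acc l1) l2 := by
  simp [pvDApp, List.foldl_append]

theorem pv_mem_push (acc : List (Int × Int)) (t x : Int × Int) (h : x ∈ acc) : x ∈ pvPush acc t := by
  unfold pvPush
  split
  · exact h
  · exact List.mem_append_left _ h

theorem pv_mem_dApp (acc l : List (Int × Int)) (x : Int × Int) (h : x ∈ acc ∨ x ∈ l) :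
    x ∈ pvDApp acc l := by
  induction l generalizing acc with
  | nil => simpa [pvDApp] using h.resolve_right (by simp)
  | cons y t ih =>
      show x ∈ pvDApp (pvPush acc y) t
      rcases h with h | h
      · exact ih _ (Or.inl (pv_mem_push acc y x h))
      · rcases List.mem_cons.mp h with rfl | h
        · refine ih _ (Or.inl ?_)
          unfold pvPush; split
          · assumption
          · simp
        · exact ih _ (Or.inr h)

-- D3: elements already present may be dropped from the pending list
theorem pvDApp_filter (p : (Int × Int) → Bool) (l acc : List (Int × Int))
    (h : ∀ t ∈ l, p t = false → t ∈ acc) : pvDApp acc l = pvDApp acc (l.filter p) := by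
  induction l generalizing acc with
  | nil => rfl
  | cons y t ih =>
      by_cases hp : p y = true
      · show pvDApp (pvPush acc y) t = pvDApp acc ((y :: t).filter p)
        rw [List.filter_cons_of_pos hp]
        exact ih _ (fun s hs hps => pv_mem_push acc y s (h s (List.mem_cons_of_mem _ hs) hps))
      · have hy : y ∈ acc := h y List.mem_cons_self (by simpa using hp)
        show pvDApp (pvPush acc y) t = pvDApp acc ((y :: t).filter p)
        rw [List.filter_cons_of_neg (by simpa using hp)]
        have : pvPush acc y = acc := by unfold pvPush; simp [hy]
        rw [this]
        exact ih _ (fun s hs hps => h s (List.mem_cons_of_mem _ hs) hps)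

-- insertBy facts
theorem pv_insertBy_all_before (bef : (Int × Int) → (Int × Int) → Bool) (x : Int × Int)
    (l : List (Int × Int)) (h : ∀ e ∈ l, bef x e = true) :
    PySem.List.insertBy bef x l = x :: l := by
  cases l with
  | nil => rfl
  | cons y ys => simp [PySem.List.insertBy, h y List.mem_cons_self]

theorem pv_insertBy_append (bef : (Int × Int) → (Int × Int) → Bool) (x : Int × Int)
    (l1 l2 : List (Int × Int)) (h : ∀ e ∈ l1, bef x e = false) :
    PySem.List.insertBy bef x (l1 ++ l2) = l1 ++ PySem.List.insertBy bef x l2 := by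
  induction l1 with
  | nil => rfl
  | cons y ys ih =>
      simp [PySem.List.insertBy, h y List.mem_cons_self,
        ih (fun e he => h e (List.mem_cons_of_mem _ he))]

-- FC: a stable ascending sort commutes with filtering
theorem pv_insertBy_filter (k : (Int × Int) → Int) (p : (Int × Int) → Bool) (x : Int × Int)
    (l : List (Int × Int)) (hs : l.Pairwise (fun a b => k a ≤ k b)) :
    (PySem.List.insertBy (pvBef k) x l).filter p =
      if p x then PySem.List.insertBy (pvBef k) x (l.filter p) else l.filter p := by
  induction l with
  | nil =>
      by_cases hp : p x = true <;> simp [PySem.List.insertBy, hp]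
  | cons e t ih =>
      rcases List.pairwise_cons.mp hs with ⟨he, ht⟩
      by_cases hbe : pvBef k x e = true
      · have hxe : k x < k e := by simpa [pvBef] using hbe
        rw [pv_insertBy_all_before (pvBef k) x (e :: t)
          (fun f hf => by
            have : k e ≤ k f := by
              rcases List.mem_cons.mp hf with rfl | hf
              · exact le_refl _
              · exact he f hf
            simp [pvBef]; omega)]
        by_cases hp : p x = true
        · rw [List.filter_cons_of_pos hp, if_pos hp]
          rw [pv_insertBy_all_before (pvBef k) x ((e :: t).filter p)
            (fun f hf => by
              have hmem := List.mem_of_mem_filter hf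
              have : k e ≤ k f := by
                rcases List.mem_cons.mp hmem with rfl | hmem
                · exact le_refl _
                · exact he f hmem
              simp [pvBef]; omega)]
        · rw [List.filter_cons_of_neg (by simpa using hp), if_neg hp]
      · have hxe : ¬ k x < k e := by simpa [pvBef] using hbe
        have hins : PySem.List.insertBy (pvBef k) x (e :: t) =
            e :: PySem.List.insertBy (pvBef k) x t := by
          simp [PySem.List.insertBy, hbe]
        rw [hins]
        by_cases hpe : p e = true
        · rw [List.filter_cons_of_pos hpe, List.filter_cons_of_pos hpe, ih ht]
          by_cases hp : p x = true
          · rw [if_pos hp, if_pos hp]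
            have : PySem.List.insertBy (pvBef k) x (e :: t.filter p) =
                e :: PySem.List.insertBy (pvBef k) x (t.filter p) := by
              simp [PySem.List.insertBy, hbe]
            rw [this]
          · rw [if_neg hp, if_neg hp]
        · rw [List.filter_cons_of_neg (by simpa using hpe),
            List.filter_cons_of_neg (by simpa using hpe), ih ht]

theorem pv_sorted_append_singleton (k : (Int × Int) → Int) (l : List (Int × Int)) (x : Int × Int) :
    PySem.List.sorted (l ++ [x]) k false =
      PySem.List.insertBy (pvBef k) x (PySem.List.sorted l k false) := by
  rw [PySem.List.sorted_eq_foldl_insertBy, PySem.List.sorted_eq_foldl_insertBy, List.foldl_append]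
  rfl

theorem pv_sorted_filter (k : (Int × Int) → Int) (p : (Int × Int) → Bool) (l : List (Int × Int)) :
    (PySem.List.sorted l k false).filter p = PySem.List.sorted (l.filter p) k false := by
  induction l using List.reverseRecOn with
  | nil => rfl
  | append_singleton l x ih =>
      rw [pv_sorted_append_singleton, List.filter_append,
        pv_insertBy_filter k p x _ (PySem.List.sorted_pairwise l k)]
      by_cases hp : p x = true
      · simp only [hp, if_pos, List.filter_cons_of_pos hp, List.filter_nil, ih,
          pv_sorted_append_singleton]
      · simp only [List.filter_cons_of_neg (by simpa using hp), List.filter_nil,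
          List.append_nil, ih, if_neg hp]

-- GRP: a stable ascending sort is the concatenation of the key-buckets
theorem pv_insertBy_flatMap (k : (Int × Int) → Int) (x : Int × Int) (a b : Int)
    (B : Int → List (Int × Int)) (ha : a ≤ k x) (hb : k x < b)
    (hB : ∀ i, ∀ t ∈ B i, k t = i) :
    PySem.List.insertBy (pvBef k) x ((PySem.List.pyRange a b).flatMap B) =
      (PySem.List.pyRange a b).flatMap (fun i => if k x = i then B i ++ [x] else B i) := by
  suffices h : ∀ (n : Nat) (a : Int), a ≤ k x → (b - a).toNat = n →
      PySem.List.insertBy (pvBef k) x ((PySem.List.pyRange a b).flatMap B) =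
        (PySem.List.pyRange a b).flatMap (fun i => if k x = i then B i ++ [x] else B i) by
    exact h (b - a).toNat a ha rfl
  intro n
  induction n with
  | zero => intro a ha hn; omega
  | succ n ih =>
      intro a ha hn
      have hab : a < b := lt_of_le_of_lt ha hb
      rw [PySem.List.pyRange_one_cons hab, List.flatMap_cons, List.flatMap_cons]
      have hBa : ∀ e ∈ B a, pvBef k x e = false := fun e he => by
        have := hB a e he; simp [pvBef]; omega
      rw [pv_insertBy_append _ _ _ _ hBa]
      by_cases hka : k x = a
      · have hrest : ∀ e ∈ (PySem.List.pyRange (a + 1) b).flatMap B, pvBef k x e = true := by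
          intro e he
          rcases List.mem_flatMap.mp he with ⟨i, hi, hei⟩
          have hi' := PySem.List.mem_pyRange_one.mp hi
          have := hB i e hei
          simp [pvBef]; omega
        rw [pv_insertBy_all_before _ _ _ hrest, if_pos hka]
        have : ((PySem.List.pyRange (a + 1) b).flatMap fun i => if k x = i then B i ++ [x] else B i) =
            (PySem.List.pyRange (a + 1) b).flatMap B := by
          refine List.flatMap_congr (fun i hi => ?_)
          have hi' := PySem.List.mem_pyRange_one.mp hi
          rw [if_neg (by omega)]
        rw [this]; simp
      · have hka' : a + 1 ≤ k x := by omega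
        rw [ih (a + 1) hka' (by omega), if_neg hka]

theorem pv_sorted_grouped (k : (Int × Int) → Int) (l : List (Int × Int)) (b : Int)
    (h : ∀ t ∈ l, 0 ≤ k t ∧ k t < b) :
    PySem.List.sorted l k false =
      (PySem.List.pyRange 0 b).flatMap (fun i => l.filter (fun t => decide (k t = i))) := by
  induction l using List.reverseRecOn with
  | nil =>
      have h1 : ∀ l : List Int, l.flatMap (fun _ => ([] : List (Int × Int))) = [] := by
        intro l
        induction l with
        | nil => rfl
        | cons y t ih => simp [ih]
      simp [h1]
      rfl
  | append_singleton l x ih =>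
      have hx := h x (by simp)
      have hl : ∀ t ∈ l, 0 ≤ k t ∧ k t < b := fun t ht => h t (by simp [ht])
      rw [pv_sorted_append_singleton, ih hl,
        pv_insertBy_flatMap k x 0 b _ hx.1 hx.2
          (fun i t ht => by simpa using (List.mem_filter.mp ht).2)]
      refine List.flatMap_congr (fun i _ => ?_)
      rw [List.filter_append]
      by_cases hki : k x = i
      · rw [if_pos hki]
        simp [hki]
      · rw [if_neg hki]
        simp [hki]

-- reverse sort by length = ascending sort by the negated length
theorem pv_sorted_rev_neg (l : List (Int × Int)) :
    PySem.List.sorted l pvLenK true = PySem.List.sorted l pvNegK false := by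
  rw [PySem.List.sorted_rev_eq_foldl_insertBy, PySem.List.sorted_eq_foldl_insertBy]
  have : (fun a b => decide (pvLenK b < pvLenK a)) = fun a b => decide (pvNegK a < pvNegK b) := by
    funext a b
    simp only [pvLenK, pvNegK, decide_eq_decide]
    omega
  rw [this]

-- argsort: mapping the gather over sorted indices is the sort of the list
theorem pv_map_insertBy (g : Int → Int × Int) (k : (Int × Int) → Int) (j : Int) (acc : List Int) :
    (PySem.List.insertBy (fun a b => decide (k (g b) < k (g a))) j acc).map g =
      PySem.List.insertBy (fun a b => decide (k b < k a)) (g j) (acc.map g) := by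
  induction acc with
  | nil => rfl
  | cons y ys ih =>
      by_cases hb : decide (k (g y) < k (g j)) = true
      · simp [PySem.List.insertBy, hb]
      · simp [PySem.List.insertBy, hb, ih]

theorem pv_map_foldl (g : Int → Int × Int) (k : (Int × Int) → Int) (idxs : List Int)
    (acc : List Int) :
    (idxs.foldl (fun acc j => PySem.List.insertBy (fun a b => decide (k (g b) < k (g a))) j acc) acc).map g =
      idxs.foldl (fun acc j => PySem.List.insertBy (fun a b => decide (k b < k a)) (g j) acc) (acc.map g) := by
  induction idxs generalizing acc with
  | nil => rfl
  | cons j t ih => rw [List.foldl_cons, List.foldl_cons, ih, pv_map_insertBy]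

theorem pv_map_sorted_rev (g : Int → Int × Int) (k : (Int × Int) → Int) (idxs : List Int) :
    (PySem.List.sorted idxs (fun j => k (g j)) true).map g =
      PySem.List.sorted (idxs.map g) k true := by
  rw [PySem.List.sorted_rev_eq_foldl_insertBy, PySem.List.sorted_rev_eq_foldl_insertBy,
    List.foldl_map]
  exact pv_map_foldl g k idxs []

theorem pv_argsort (parent : List (Int × Int)) :
    (PySem.List.sorted (PySem.List.pyRange 0 (PySem.List.len (parent.map pvLenK)))
        (fun x => PySem.List.pyGetD (parent.map pvLenK) x 0) true).map
      (fun j => PySem.List.pyGetD parent j (0, 0)) =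
    PySem.List.sorted parent pvLenK true := by
  have hkey : (fun x => PySem.List.pyGetD (parent.map pvLenK) x 0) =
      fun j => pvLenK (PySem.List.pyGetD parent j (0, 0)) := by
    funext j
    have h := PySem.List.pyGetD_map pvLenK parent j ((0, 0) : Int × Int)
    norm_num [pvLenK] at h ⊢
    exact h
  have hlen : PySem.List.len (parent.map pvLenK) = PySem.List.len parent := by simp
  rw [hkey, hlen, pv_map_sorted_rev, PySem.List.map_pyGetD_pyRange_zero]

-- A's inner pair-building loop
theorem pv_pair_fold (i : Int) (mid : List (Int × Int)) (st : List (Int × Int) × List Int) :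
    mid.foldl (fun (st : List (Int × Int) × List Int) temp =>
        if temp.1 ≤ i ∧ i ≤ temp.2 then (st.1 ++ [temp], st.2 ++ [temp.2 - temp.1]) else st) st =
      (st.1 ++ mid.filter (pvCov i), st.2 ++ (mid.filter (pvCov i)).map pvLenK) := by
  induction mid generalizing st with
  | nil => simp
  | cons y t ih =>
      by_cases hc : y.1 ≤ i ∧ i ≤ y.2
      · rw [List.foldl_cons, if_pos hc, ih, List.filter_cons_of_pos (by simpa [pvCov] using hc)]
        simp [pvLenK]
      · rw [List.foldl_cons, if_neg hc, ih, List.filter_cons_of_neg (by simpa [pvCov] using hc)]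

-- A's dedup-append loop over gathered indices
theorem pv_inner_fold (parent : List (Int × Int)) (idxs : List Int) (acc : List (Int × Int)) :
    idxs.foldl (fun acc index =>
      if PySem.List.pyGetD parent index (0, 0) ∈ acc then acc
      else acc ++ [PySem.List.pyGetD parent index (0, 0)]) acc =
    pvDApp acc (idxs.map (fun j => PySem.List.pyGetD parent j (0, 0))) := by
  rw [pvDApp, List.foldl_map]
  rfl

theorem pv_foldl_dApp_flatMap (l : List Int) (S : Int → List (Int × Int))
    (acc : List (Int × Int)) :
    l.foldl (fun acc i => pvDApp acc (S i)) acc = pvDApp acc (l.flatMap S) := by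
  induction l generalizing acc with
  | nil => simp [pvDApp]
  | cons y t ih => rw [List.foldl_cons, List.flatMap_cons, pvDApp_append, ih]

-- the per-bin blocks of A and of B
def pvLAf (mid : List (Int × Int)) (i : Int) : List (Int × Int) :=
  PySem.List.sorted (mid.filter (pvCov i)) pvNegK false
def pvLBf (N : Int) (mid : List (Int × Int)) (i : Int) : List (Int × Int) :=
  PySem.List.sorted ((mid.filter (pvKept N)).filter (fun t => decide (pvFb t = i))) pvNegK false

-- shape of A
theorem pv_A_shape (N : Int) (mid : List (Int × Int)) :
    boundary_sorted N mid = pvDApp [] ((PySem.List.pyRange 0 N).flatMap (pvLAf mid)) := by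
  rw [← pv_foldl_dApp_flatMap]
  unfold boundary_sorted
  congr 1
  funext acc i
  simp only [pv_pair_fold, List.nil_append]
  rw [pv_inner_fold, pv_argsort, pv_sorted_rev_neg]
  rfl

-- B's dedup loop with its seen set: the seen set always equals the output list
theorem pv_set_fold (l : List (Int × Int)) (out : List (Int × Int)) :
    (l.foldl (fun (st : List (Int × Int) × PySem.Set (Int × Int)) t =>
        if (t.1, t.2) ∈ st.2 then st
        else (st.1 ++ [t], PySem.Set.add st.2 (t.1, t.2)))
      (out, out)).1 = pvDApp out l := by
  induction l generalizing out with
  | nil => rfl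
  | cons y t ih =>
      have hstep : (if (y.1, y.2) ∈ (out : PySem.Set (Int × Int)) then
            ((out, out) : List (Int × Int) × PySem.Set (Int × Int))
          else (out ++ [y], PySem.Set.add out (y.1, y.2))) = (pvPush out y, pvPush out y) := by
        by_cases hy : y ∈ out
        · rw [if_pos hy]
          unfold pvPush
          rw [if_pos hy]
        · rw [if_neg hy]
          unfold pvPush
          rw [if_neg hy]
          have : PySem.Set.add (out : PySem.Set (Int × Int)) (y.1, y.2) = out ++ [y] := by
            simp [PySem.Set.add, PySem.Set.contains, hy]
          rw [this]
      simp only [List.foldl_cons]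
      rw [hstep]
      exact ih (pvPush out y)

-- shape of B
theorem pv_B_shape (N : Int) (mid : List (Int × Int)) :
    boundary_sorted_alt N mid =
      pvDApp [] (PySem.List.sorted
        (PySem.List.sorted (mid.filter (pvKept N)) pvNegK false) pvFb false) := by
  exact pv_set_fold _ []

-- one bucket of A, with its stale repeats removed, is one bucket of B
theorem pv_bucket (N : Int) (mid : List (Int × Int)) (i : Int) (_h0 : 0 ≤ i) (_h1 : i < N) :
    (pvLAf mid i).filter (fun t => decide (pvFb t = i)) = pvLBf N mid i := by
  unfold pvLAf pvLBf
  rw [pv_sorted_filter, List.filter_filter, List.filter_filter]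
  congr 1
  refine List.filter_congr (fun t _ => ?_)
  simp only [pvCov, pvKept, pvFb, ← Bool.decide_and, decide_eq_decide]
  omega

-- replacing A's blocks by B's blocks, left to right, does not change the dedup result
theorem pv_exchange (N : Int) (mid : List (Int × Int)) :
    ∀ (n : Nat) (j : Int), 0 ≤ j → j ≤ N → (N - j).toNat = n →
      pvDApp [] ((PySem.List.pyRange 0 j).flatMap (pvLBf N mid) ++
        (PySem.List.pyRange j N).flatMap (pvLAf mid)) =
      pvDApp [] ((PySem.List.pyRange 0 N).flatMap (pvLBf N mid)) := by
  intro n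
  induction n with
  | zero =>
      intro j h0 hjN hn
      have : j = N := by omega
      subst this
      rw [PySem.List.pyRange_one_eq_nil (le_refl j)]
      simp
  | succ n ih =>
      intro j h0 hjN hn
      have hjN' : j < N := by omega
      rw [PySem.List.pyRange_one_cons hjN', List.flatMap_cons, ← List.append_assoc,
        pvDApp_append, pvDApp_append]
      have hmid : pvDApp (pvDApp [] ((PySem.List.pyRange 0 j).flatMap (pvLBf N mid)))
          (pvLAf mid j) =
          pvDApp (pvDApp [] ((PySem.List.pyRange 0 j).flatMap (pvLBf N mid))) (pvLBf N mid j) := by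
        rw [pvDApp_filter (fun t => decide (pvFb t = j)) _ _ ?_, pv_bucket N mid j h0 hjN']
        intro t ht hfb
        have hfb' : pvFb t ≠ j := by simpa using hfb
        have ht' : t ∈ mid.filter (pvCov j) := (PySem.List.mem_sorted _ _ _ _).mp ht
        rcases List.mem_filter.mp ht' with ⟨tmem, hcov⟩
        have hcov' : t.1 ≤ j ∧ j ≤ t.2 := by simpa [pvCov] using hcov
        have hfbb : 0 ≤ pvFb t ∧ pvFb t < j := by
          unfold pvFb at hfb' ⊢; omega
        refine pv_mem_dApp _ _ _ (Or.inr (List.mem_flatMap.mpr ⟨pvFb t,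
          PySem.List.mem_pyRange_one.mpr hfbb, ?_⟩))
        unfold pvLBf
        rw [PySem.List.mem_sorted]
        refine List.mem_filter.mpr ⟨List.mem_filter.mpr ⟨tmem, ?_⟩, by simp⟩
        unfold pvKept pvFb at *
        simp only [decide_eq_true_eq]
        omega
      rw [hmid, ← pvDApp_append, ← pvDApp_append, ← List.append_assoc,
        show (PySem.List.pyRange 0 j).flatMap (pvLBf N mid) ++ pvLBf N mid j =
          (PySem.List.pyRange 0 (j + 1)).flatMap (pvLBf N mid) by
            rw [PySem.List.pyRange_one_succ_right h0, List.flatMap_append]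
            simp]
      exact ih (j + 1) (by omega) (by omega) (by omega)

theorem pv_main (N : Int) (mid : List (Int × Int)) :
    boundary_sorted N mid = boundary_sorted_alt N mid := by
  rw [pv_A_shape, pv_B_shape]
  have hb : ∀ t ∈ PySem.List.sorted (mid.filter (pvKept N)) pvNegK false,
      0 ≤ pvFb t ∧ pvFb t < N := by
    intro t ht
    have ht' := (PySem.List.mem_sorted _ _ _ _).mp ht
    rcases List.mem_filter.mp ht' with ⟨_, hk⟩
    unfold pvKept at hk
    unfold pvFb
    simp only [decide_eq_true_eq] at hk
    omega
  rw [pv_sorted_grouped pvFb _ N hb]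
  have hflat : ((PySem.List.pyRange 0 N).flatMap
        (fun i => (PySem.List.sorted (mid.filter (pvKept N)) pvNegK false).filter
          (fun t => decide (pvFb t = i)))) =
      (PySem.List.pyRange 0 N).flatMap (pvLBf N mid) := by
    refine List.flatMap_congr (fun i _ => ?_)
    rw [pv_sorted_filter]
    rfl
  rw [hflat]
  by_cases hN : 0 ≤ N
  · have := pv_exchange N mid (N - 0).toNat 0 (le_refl 0) hN rfl
    rw [PySem.List.pyRange_one_eq_nil (le_refl 0)] at this
    simpa using this
  · rw [PySem.List.pyRange_one_eq_nil (by omega)]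
    simp

-- ===== VERDICT (by name: the statement is the Claim_ definition above) =====
theorem boundary_sorted_spec : Claim_equal_boundary_sorted := by
  intro N mid _
  exact pv_main N mid
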